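-- pv_equiv track=rewrite | github.com/lalitkishor/Program | distrubted.py | distributed
-- ===== SOURCE A (Python) =====
-- def ret(each,database):
--     ans = []
--     for x in database:
--         if x != each:
--             ans += database[x]
--     return sorted(ans)
--
-- def distributed(uid,qcPeople):
--     database = {}
--     medium = {}
--     qc = {}
--     for i,e in enumerate(uid):
--         qc[i] = ''
--     for req,name in enumerate(uid):
--         if name not in database:
--             database[name] = [req]
--         else:
--             database[name].append(req)
--     for each in qcPeople:
--         medium[each]=ret(each,database)
--     for _ in range(len(uid)):
--         for e in medium:
--                 for y in medium[e]:
--                     if qc[y]== '':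
--                         qc[y] = e
--                         medium[e].remove(y)
--                         break
--     return qc
-- ===== SOURCE B (Python) =====
-- def distributed(uid, qcPeople):
--     n = len(uid)
--     qc = [''] * n
--     people = []
--     seen = set()
--     for p in qcPeople:
--         if p not in seen:
--             seen.add(p)
--             people.append(p)
--     ptrs = [0] * len(people)
--     rounds = 0
--     while rounds < n:
--         assigned = False
--         for k in range(len(people)):
--             p = people[k]
--             i = ptrs[k]
--             while i < n and (qc[i] != '' or uid[i] == p):
--                 i += 1
--             if i < n:
--                 qc[i] = p
--                 ptrs[k] = i + 1
--                 assigned = True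
--             else:
--                 ptrs[k] = i
--         if not assigned:
--             break
--         rounds += 1
--     return {i: qc[i] for i in range(n)}
-- ===== Notes on version B (the rewrite author's own statement) =====
-- stated objective: faster
-- what changed: Replaces A's per-name grouping dict + sorted concatenation and its N full rescans of each person's shrinking candidate list by a per-person monotone pointer over the index range that skips already-assigned or self-owned indices exactly once, with an early exit once a whole round assigns nothing.
import Mathlib
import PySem

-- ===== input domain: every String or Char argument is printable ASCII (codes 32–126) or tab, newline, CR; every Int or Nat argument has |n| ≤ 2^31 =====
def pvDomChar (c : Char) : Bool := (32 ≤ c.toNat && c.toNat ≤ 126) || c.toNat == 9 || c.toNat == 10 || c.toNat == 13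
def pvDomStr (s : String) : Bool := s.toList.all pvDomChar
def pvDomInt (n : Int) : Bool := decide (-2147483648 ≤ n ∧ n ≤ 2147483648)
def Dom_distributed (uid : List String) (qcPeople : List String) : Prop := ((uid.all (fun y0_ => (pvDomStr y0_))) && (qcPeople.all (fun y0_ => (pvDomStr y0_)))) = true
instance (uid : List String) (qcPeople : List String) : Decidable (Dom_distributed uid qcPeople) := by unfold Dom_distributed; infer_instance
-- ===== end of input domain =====

-- B replaces A's grouping-dict + sorted concatenation and its N full rescans of each shrinking
-- candidate list by a per-person monotone pointer over the index range, with an early exit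
-- once a round assigns nothing (objective: faster; measured asymptotic speed-up).


-- ===== PORT A =====
-- `ret(each, database)`: concatenate the index lists of every other key, then sort.
def ret (each : String) (database : PySem.Dict String (List Int)) : List Int :=
  PySem.List.sorted
    (database.items.foldl
      (fun ans x => if x.1 ≠ each then ans ++ database.getD x.1 [] else ans) [])
    (fun x => x) false

-- one pass of A's inner `for e in medium: for y in medium[e]: … break` body for one key e
-- (`qc[y]` / `medium[e]` are always-present lookups in A; ported with getD, exact on reachable states)
def distributedStepA
    (st : PySem.Dict Int String × PySem.Dict String (List Int)) (e : String) :
    PySem.Dict Int String × PySem.Dict String (List Int) :=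
  match (st.2.getD e []).find? (fun y => st.1.getD y "" == "") with
  | some y => (st.1.insert y e, st.2.modify e [] (fun l => (PySem.List.remove? l y).getD l))
  | none => st

def distributed (uid : List String) (qcPeople : List String) : List (Int × String) :=
  let qc : PySem.Dict Int String :=
    (PySem.List.enumerate uid).foldl (fun qc ie => qc.insert ie.1 "") PySem.Dict.empty
  let database : PySem.Dict String (List Int) :=
    (PySem.List.enumerate uid).foldl
      (fun db rn =>
        if db.contains rn.2 = false then db.insert rn.2 [rn.1]
        else db.modify rn.2 [] (fun l => l ++ [rn.1]))
      PySem.Dict.empty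
  let medium : PySem.Dict String (List Int) :=
    qcPeople.foldl (fun m each => m.insert each (ret each database)) PySem.Dict.empty
  let final :=
    (List.range uid.length).foldl
      (fun st _ => st.2.keys.foldl distributedStepA st) (qc, medium)
  final.1.items

-- ===== PORT B =====
-- `while i < n and (qc[i] != '' or uid[i] == p): i += 1`
def pvSkip (uid qc : List String) (p : String) (i : Nat) : Nat :=
  if h : i < uid.length then
    if qc.getD i "" ≠ "" ∨ uid.getD i "" = p then pvSkip uid qc p (i + 1) else i
  else i
termination_by uid.length - i
decreasing_by omega

-- one round: `for k in range(len(people)): …`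
def pvRound (uid people : List String)
    (st : List String × List Nat × Bool) : List String × List Nat × Bool :=
  (List.range people.length).foldl
    (fun st k =>
      let p := people.getD k ""
      let i := pvSkip uid st.1 p (st.2.1.getD k 0)
      if i < uid.length then (st.1.set i p, st.2.1.set k (i + 1), true)
      else (st.1, st.2.1.set k i, st.2.2))
    st

-- `while rounds < n: … ; if not assigned: break ; rounds += 1`
def pvLoop (uid people : List String) : Nat → List String → List Nat → List String
  | 0, qc, _ => qc
  | fuel + 1, qc, ptrs =>
    let st := pvRound uid people (qc, ptrs, false)
    if st.2.2 then pvLoop uid people fuel st.1 st.2.1 else st.1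

def distributed_alt (uid : List String) (qcPeople : List String) : List (Int × String) :=
  let n := uid.length
  let people :=
    (qcPeople.foldl
      (fun st p => if PySem.Set.contains st.1 p then st else (PySem.Set.add st.1 p, st.2 ++ [p]))
      ((PySem.Set.empty : PySem.Set String), ([] : List String))).2
  let qc := pvLoop uid people n (List.replicate n "") (List.replicate people.length 0)
  (List.range n).map (fun (i : Nat) => ((i : Int), qc.getD i ""))

-- ===== PRECONDITION & SPEC =====
def Spec_distributed (uid : List String) (qcPeople : List String) (out : List (Int × String)) : Prop := out = distributed_alt uid qcPeople
instance (uid : List String) (qcPeople : List String) (out : List (Int × String)) : Decidable (Spec_distributed uid qcPeople out) := by unfold Spec_distributed; infer_instance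

-- ===== CLAIM (what is proved, stated in full; the proofs are below) =====
def Claim_equal_distributed : Prop := ∀ (uid : List String) (qcPeople : List String), Dom_distributed uid qcPeople → Spec_distributed uid qcPeople (distributed uid qcPeople)

-- ===== LEMMAS AND PROOFS =====


-- ----- proof-side definitions -----

-- A's round: one pass of `for e in medium: …` (keys snapshot at round entry)
def roundA (st : PySem.Dict Int String × PySem.Dict String (List Int)) :
    PySem.Dict Int String × PySem.Dict String (List Int) :=
  st.2.keys.foldl distributedStepA st

-- B's per-person step, named (pvRound is the fold of this over range)
def bStep (uid people : List String) (st : List String × List Nat × Bool) (k : Nat) :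
    List String × List Nat × Bool :=
  let p := people.getD k ""
  let i := pvSkip uid st.1 p (st.2.1.getD k 0)
  if i < uid.length then (st.1.set i p, st.2.1.set k (i + 1), true)
  else (st.1, st.2.1.set k i, st.2.2)

-- indices ≥ t whose owner is not p, in increasing order
def candTail (uid : List String) (p : String) (t : Nat) : List Int :=
  if t < uid.length then
    (if uid.getD t "" ≠ p then ((t : Int) :: candTail uid p (t + 1)) else candTail uid p (t + 1))
  else []
termination_by uid.length - t
decreasing_by all_goals omega

-- every entry is an in-range index already assigned a non-empty value
def goodPre (qc : List String) (L : List Int) : Prop :=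
  ∀ y ∈ L, ∃ j : Nat, y = (j : Int) ∧ j < qc.length ∧ qc.getD j "" ≠ ""

-- the simulation relation between A's (qc dict, medium dict) and B's (qc array, pointers)
def SimRel (uid people : List String)
    (stA : PySem.Dict Int String × PySem.Dict String (List Int))
    (qc : List String) (ptrs : List Nat) : Prop :=
  qc.length = uid.length ∧
  ptrs.length = people.length ∧
  stA.1 = PySem.Dict.mk (PySem.List.enumerate qc) ∧
  stA.2.keys = people ∧
  ∀ k, k < people.length →
    ∃ pre, stA.2.getD (people.getD k "") [] =
        pre ++ candTail uid (people.getD k "") (ptrs.getD k 0) ∧ goodPre qc pre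

-- ----- small library-style facts about the ports -----

lemma pvRound_eq (uid people : List String) (st : List String × List Nat × Bool) :
    pvRound uid people st = (List.range people.length).foldl (bStep uid people) st := rfl

lemma pvSkip_spec (uid qc : List String) (p : String) (t : Nat) :
    t ≤ pvSkip uid qc p t ∧
    (∀ j, t ≤ j → j < pvSkip uid qc p t → (qc.getD j "" ≠ "" ∨ uid.getD j "" = p)) ∧
    (pvSkip uid qc p t < uid.length →
      qc.getD (pvSkip uid qc p t) "" = "" ∧ uid.getD (pvSkip uid qc p t) "" ≠ p) := by
  suffices h : ∀ (d t : Nat), uid.length - t ≤ d →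
      t ≤ pvSkip uid qc p t ∧
      (∀ j, t ≤ j → j < pvSkip uid qc p t → (qc.getD j "" ≠ "" ∨ uid.getD j "" = p)) ∧
      (pvSkip uid qc p t < uid.length →
        qc.getD (pvSkip uid qc p t) "" = "" ∧ uid.getD (pvSkip uid qc p t) "" ≠ p) by
    exact h (uid.length - t) t le_rfl
  intro d
  induction d with
  | zero =>
    intro t ht
    have hnt : ¬ t < uid.length := by omega
    rw [pvSkip]; simp only [hnt, dite_false]
    exact ⟨le_rfl, fun j h1 h2 => absurd (lt_of_le_of_lt h1 h2) (lt_irrefl _),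
      fun h => h.elim⟩
  | succ d ih =>
    intro t ht
    by_cases hnt : t < uid.length
    · rw [pvSkip]; simp only [hnt, dite_true]
      by_cases hcond : qc.getD t "" ≠ "" ∨ uid.getD t "" = p
      · simp only [hcond, if_true]
        obtain ⟨h1, h2, h3⟩ := ih (t + 1) (by omega)
        refine ⟨by omega, ?_, h3⟩
        intro j hj1 hj2
        rcases Nat.eq_or_lt_of_le hj1 with rfl | hj
        · exact hcond
        · exact h2 j hj hj2
      · simp only [hcond, if_false]
        refine ⟨le_rfl, fun j h1 h2 => absurd (lt_of_le_of_lt h1 h2) (lt_irrefl _),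
          fun _ => ⟨?_, ?_⟩⟩
        · by_contra hq
          exact hcond (Or.inl hq)
        · intro hu
          exact hcond (Or.inr hu)
    · rw [pvSkip]; simp only [hnt, dite_false]
      exact ⟨le_rfl, fun j h1 h2 => absurd (lt_of_le_of_lt h1 h2) (lt_irrefl _),
        fun h => h.elim⟩

lemma candTail_stop (uid : List String) (p : String) (t : Nat) (h : ¬ t < uid.length) :
    candTail uid p t = [] := by
  rw [candTail]; simp [h]

lemma candTail_cons (uid : List String) (p : String) (t : Nat)
    (h : t < uid.length) (hp : uid.getD t "" ≠ p) :
    candTail uid p t = (t : Int) :: candTail uid p (t + 1) := by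
  rw [List.getD_eq_getElem uid "" h] at hp
  rw [candTail]; simp [h, hp]

lemma candTail_skip (uid : List String) (p : String) (t : Nat)
    (h : t < uid.length) (hp : uid.getD t "" = p) :
    candTail uid p t = candTail uid p (t + 1) := by
  rw [List.getD_eq_getElem uid "" h] at hp
  rw [candTail]; simp [h, hp]

lemma candTail_split (uid qc : List String) (p : String) (hlen : qc.length = uid.length)
    (i : Nat) : ∀ t, t ≤ i →
    (∀ j, t ≤ j → j < i → (qc.getD j "" ≠ "" ∨ uid.getD j "" = p)) →
    ∃ C, candTail uid p t = C ++ candTail uid p i ∧ goodPre qc C := by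
  suffices h : ∀ (d t : Nat), i - t ≤ d → t ≤ i →
      (∀ j, t ≤ j → j < i → (qc.getD j "" ≠ "" ∨ uid.getD j "" = p)) →
      ∃ C, candTail uid p t = C ++ candTail uid p i ∧ goodPre qc C by
    intro t h1 h2; exact h (i - t) t le_rfl h1 h2
  intro d
  induction d with
  | zero =>
    intro t hd hti _
    have : t = i := by omega
    subst this
    exact ⟨[], by simp, by intro y hy; simp at hy⟩
  | succ d ih =>
    intro t hd hti hsk
    rcases Nat.eq_or_lt_of_le hti with rfl | hlt
    · exact ⟨[], by simp, by intro y hy; simp at hy⟩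
    by_cases hnt : t < uid.length
    · by_cases hup : uid.getD t "" = p
      · obtain ⟨C, hC1, hC2⟩ := ih (t + 1) (by omega) (by omega)
          (fun j h1 h2 => hsk j (by omega) h2)
        exact ⟨C, by rw [candTail_skip uid p t hnt hup, hC1], hC2⟩
      · obtain ⟨C, hC1, hC2⟩ := ih (t + 1) (by omega) (by omega)
          (fun j h1 h2 => hsk j (by omega) h2)
        have hqc : qc.getD t "" ≠ "" := by
          rcases hsk t le_rfl hlt with h | h
          · exact h
          · exact absurd h hup
        refine ⟨(t : Int) :: C, ?_, ?_⟩
        · rw [candTail_cons uid p t hnt hup, hC1]; rfl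
        · intro y hy
          rcases List.mem_cons.mp hy with rfl | hy
          · exact ⟨t, rfl, by omega, hqc⟩
          · exact hC2 y hy
    · refine ⟨[], ?_, by intro y hy; simp at hy⟩
      rw [candTail_stop uid p t hnt, candTail_stop uid p i (by omega)]; rfl

lemma nodup_keys_mkEnum (l : List String) :
    (PySem.Dict.mk (PySem.List.enumerate l) : PySem.Dict Int String).keys.Nodup := by
  have h2 : List.Pairwise (fun (a b : Int × String) => a.1 ≠ b.1) (PySem.List.enumerate l) :=
    (PySem.List.pairwise_lt_enumerate l 0).imp (fun hab => ne_of_lt hab)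
  show ((PySem.List.enumerate l).map (fun p => p.1)).Nodup
  exact List.Pairwise.map (S := fun (a b : Int) => a ≠ b)
    (fun (p : Int × String) => p.1) (fun a b hab => hab) h2

lemma getD_mkEnum (l : List String) (j : Nat) (hj : j < l.length) :
    (PySem.Dict.mk (PySem.List.enumerate l) : PySem.Dict Int String).getD ((j : Int)) "" =
      l.getD j "" := by
  have hm : ((j : Int), l[j]) ∈ (PySem.Dict.mk (PySem.List.enumerate l) :
      PySem.Dict Int String).items := by
    show _ ∈ PySem.List.enumerate l
    rw [PySem.List.mem_enumerate_iff]
    exact ⟨j, hj, by simp⟩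
  rw [PySem.Dict.getD_of_mem_items _ hm (nodup_keys_mkEnum l), List.getD_eq_getElem l "" hj]

lemma insert_mkEnum (l : List String) (i : Nat) (hi : i < l.length) (p : String) :
    (PySem.Dict.mk (PySem.List.enumerate l) : PySem.Dict Int String).insert ((i : Int)) p =
      PySem.Dict.mk (PySem.List.enumerate (l.set i p)) := by
  have hm : ((i : Int), l[i]) ∈ PySem.List.enumerate l := by
    rw [PySem.List.mem_enumerate_iff]
    exact ⟨i, hi, by simp⟩
  have hc : (PySem.Dict.mk (PySem.List.enumerate l) :
      PySem.Dict Int String).contains ((i : Int)) = true := by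
    rw [PySem.Dict.contains_iff_mem_keys]
    exact List.mem_map_of_mem hm
  apply PySem.Dict.ext
  rw [PySem.Dict.items_insert_of_contains _ _ hc]
  show (PySem.List.enumerate l).map _ = PySem.List.enumerate (l.set i p)
  apply List.ext_getElem
  · simp [PySem.List.length_enumerate]
  · intro k h1 h2
    have hkl : k < l.length := by
      simpa [PySem.List.length_enumerate] using h1
    simp only [List.getElem_map, PySem.List.getElem_enumerate]
    by_cases hk : k = i
    · subst hk; simp
    · have hne : (((0 : Int) + (k : Nat) : Int) == ((i : Nat) : Int)) = false := by
        simp; omega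
      have hik : ¬ (i = k) := by omega
      simp [hik]
      exact hk

lemma remove?_append_of_not_mem (l₂ : List Int) (v : Int) :
    ∀ l₁ : List Int, v ∉ l₁ →
    PySem.List.remove? (l₁ ++ l₂) v = (PySem.List.remove? l₂ v).map (fun t => l₁ ++ t) := by
  intro l₁
  induction l₁ with
  | nil => intro _; simp
  | cons x l₁ ih =>
    intro h
    have hx : x ≠ v := by intro hxv; exact h (by simp [hxv])
    have h' : v ∉ l₁ := by intro hm; exact h (by simp [hm])
    rw [List.cons_append, PySem.List.remove?_cons_of_ne _ hx, ih h']
    cases PySem.List.remove? l₂ v <;> simp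

lemma getD_foldl_insert_const (l : List String) (f : String → List Int)
    (d : PySem.Dict String (List Int)) (y : String) :
    (l.foldl (fun m x => m.insert x (f x)) d).getD y [] =
      if y ∈ l then f y else d.getD y [] := by
  induction l generalizing d with
  | nil => simp
  | cons x l ih =>
    rw [List.foldl_cons, ih]
    by_cases hy : y ∈ l
    · simp [hy]
    · by_cases hyx : y = x
      · subst hyx; simp [hy]
      · simp [hy, hyx, PySem.Dict.getD_insert]

lemma people_eq_update (l : List String) (s : PySem.Set String) :
    (l.foldl
      (fun st p => if PySem.Set.contains st.1 p then st else (PySem.Set.add st.1 p, st.2 ++ [p]))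
      (s, s)).2 = PySem.Set.update s l := by
  induction l generalizing s with
  | nil => rfl
  | cons p l ih =>
    rw [List.foldl_cons]
    have hupd : PySem.Set.update s (p :: l) = PySem.Set.update (PySem.Set.add s p) l := by
      simp [PySem.Set.update]
    by_cases hc : PySem.Set.contains s p
    · have hc' : p ∈ s := by simpa using hc
      have hadd : PySem.Set.add s p = s := by simp [PySem.Set.add, hc']
      rw [if_pos hc, hupd, hadd]
      exact ih s
    · have hc' : p ∉ s := by simpa using hc
      have hadd : PySem.Set.add s p = s ++ [p] := by simp [PySem.Set.add, hc']
      rw [if_neg hc, hupd, hadd]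
      exact ih (s ++ [p])

-- ----- database / ret characterization -----

def dbA (uid : List String) : PySem.Dict String (List Int) :=
  (PySem.List.enumerate uid).foldl
    (fun db rn =>
      if db.contains rn.2 = false then db.insert rn.2 [rn.1]
      else db.modify rn.2 [] (fun l => l ++ [rn.1]))
    PySem.Dict.empty

lemma dbA_eq_modify (uid : List String) :
    dbA uid = (PySem.List.enumerate uid).foldl
      (fun db rn => db.modify rn.2 [] (fun l => l ++ [rn.1])) PySem.Dict.empty := by
  unfold dbA
  apply PySem.List.foldl_congr_mem
  intro db rn _
  cases hc : db.contains rn.2 with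
  | true => simp [PySem.Dict.modify]
  | false =>
    have hg : db.getD rn.2 [] = [] := PySem.Dict.getD_of_not_contains db [] hc
    simp [PySem.Dict.modify, hg]

lemma dbA_getD (uid : List String) (c : String) :
    (dbA uid).getD c [] =
      ((PySem.List.enumerate uid).filter (fun q => q.2 == c)).map (fun q => q.1) := by
  rw [dbA_eq_modify]
  have h1 : (PySem.List.enumerate uid).foldl
      (fun db rn => db.modify rn.2 [] (fun l => l ++ [rn.1])) PySem.Dict.empty
      = ((PySem.List.enumerate uid).map (fun q => (q.2, q.1))).foldl
        (fun d p => d.modify p.1 [] (fun x => x ++ [p.2])) PySem.Dict.empty := by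
    rw [List.foldl_map]
  rw [h1, PySem.Dict.getD_foldl_modify_append]
  simp [List.filter_map, Function.comp_def]

lemma dbA_keys (uid : List String) : (dbA uid).keys = PySem.Set.ofList uid := by
  rw [dbA_eq_modify]
  have h1 := PySem.Dict.keys_foldl_modify_key (l := PySem.List.enumerate uid)
    (key := fun rn => rn.2) (d0 := ([] : List Int))
    (f := fun _ rn l => l ++ [rn.1]) (d := PySem.Dict.empty)
  simp only [PySem.List.map_snd_enumerate] at h1
  rw [h1]
  simp [PySem.Set.update, PySem.Set.ofList_eq_foldl]

lemma group_perm (K : List String) (l : List (Int × String)) (hnd : K.Nodup) :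
    (K.flatMap (fun k => l.filter (fun q => q.2 == k))).Perm
      (l.filter (fun q => decide (q.2 ∈ K))) := by
  induction K with
  | nil => simp
  | cons k K ih =>
    have hk : k ∉ K := (List.nodup_cons.mp hnd).1
    have hK : K.Nodup := (List.nodup_cons.mp hnd).2
    rw [List.flatMap_cons]
    have e1 : (l.filter (fun q => decide (q.2 ∈ k :: K))).filter (fun q => q.2 == k)
        = l.filter (fun q => q.2 == k) := by
      rw [List.filter_filter]
      apply List.filter_congr
      intro q _
      by_cases h : q.2 = k <;> simp [h]
    have e2 : (l.filter (fun q => decide (q.2 ∈ k :: K))).filter (fun q => !(q.2 == k))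
        = l.filter (fun q => decide (q.2 ∈ K)) := by
      rw [List.filter_filter]
      apply List.filter_congr
      intro q _
      by_cases h : q.2 = k
      · simp [h, hk]
      · simp [h, List.mem_cons]
    have h3 := List.filter_append_perm (fun q => q.2 == k)
      (l.filter (fun q => decide (q.2 ∈ k :: K)))
    rw [e1, e2] at h3
    exact ((ih hK).append_left _).trans h3

lemma candTail_eq_filterEnum (uid : List String) (p : String) : ∀ t : Nat,
    candTail uid p t =
      ((PySem.List.enumerate (uid.drop t) (t : Int)).filter (fun q => !(q.2 == p))).map
        (fun q => q.1) := by
  suffices h : ∀ d t, uid.length - t ≤ d → candTail uid p t =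
      ((PySem.List.enumerate (uid.drop t) (t : Int)).filter (fun q => !(q.2 == p))).map
        (fun q => q.1) by
    intro t; exact h (uid.length - t) t le_rfl
  intro d
  induction d with
  | zero =>
    intro t hd
    have hnt : ¬ t < uid.length := by omega
    rw [candTail_stop uid p t hnt, List.drop_of_length_le (by omega)]
    simp
  | succ d ih =>
    intro t hd
    by_cases hnt : t < uid.length
    · have hdrop : uid.drop t = uid[t] :: uid.drop (t + 1) := List.drop_eq_getElem_cons hnt
      have hcast : ((t : Int) + 1) = (((t + 1 : Nat)) : Int) := by push_cast; ring
      rw [hdrop, PySem.List.enumerate_cons]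
      by_cases hup : uid.getD t "" = p
      · have hb : (uid[t] == p) = true := by
          rw [List.getD_eq_getElem uid "" hnt] at hup; simp [hup]
        rw [candTail_skip uid p t hnt hup, ih (t + 1) (by omega), ← hcast]
        simp [hb]
      · have hb : (uid[t] == p) = false := by
          rw [List.getD_eq_getElem uid "" hnt] at hup; simp [hup]
        rw [candTail_cons uid p t hnt hup, ih (t + 1) (by omega), ← hcast]
        simp [hb]
    · rw [candTail_stop uid p t hnt, List.drop_of_length_le (by omega)]
      simp

lemma candTail_pairwise (uid : List String) (p : String) :
    List.Pairwise (fun a b : Int => a < b) (candTail uid p 0) := by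
  rw [candTail_eq_filterEnum uid p 0]
  exact List.Pairwise.map (S := fun a b : Int => a < b) (fun (q : Int × String) => q.1)
    (fun a b h => h) ((PySem.List.pairwise_lt_enumerate _ _).filter _)

lemma ret_eq (uid : List String) (p : String) : ret p (dbA uid) = candTail uid p 0 := by
  unfold ret
  simp only [PySem.List.foldl_ite_eq_foldl_filter (p := fun x : String × List Int => x.1 ≠ p)
      (f := fun ans x => ans ++ (dbA uid).getD x.1 []),
    PySem.List.foldl_append_eq_flatMap, List.nil_append]
  apply PySem.List.sorted_eq_of_perm_of_pairwise_lt
  · have hkeysnd : (dbA uid).keys.Nodup := by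
      rw [dbA_keys]; exact PySem.Set.nodup_ofList uid
    rw [PySem.Dict.items_eq_map_keys (dbA uid) hkeysnd [], List.filter_map, List.flatMap_map]
    simp only [Function.comp_def, dbA_getD]
    rw [← List.map_flatMap]
    have hperm := group_perm ((dbA uid).keys.filter (fun k => decide (¬ k = p)))
      (PySem.List.enumerate uid) (hkeysnd.filter _)
    have e3 : (PySem.List.enumerate uid).filter
        (fun q => decide (q.2 ∈ (dbA uid).keys.filter (fun k => decide (¬ k = p))))
        = (PySem.List.enumerate uid).filter (fun q => !(q.2 == p)) := by
      apply List.filter_congr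
      intro q hq
      have hq2 : q.2 ∈ uid := by
        obtain ⟨kk, hkk, rfl⟩ := (PySem.List.mem_enumerate_iff uid 0 q).mp hq
        exact List.getElem_mem hkk
      have hqk : q.2 ∈ (dbA uid).keys := by
        rw [dbA_keys]; exact (PySem.Set.mem_ofList uid q.2).mpr hq2
      by_cases hqp : q.2 = p <;> simp [List.mem_filter, hqk, hqp]
    rw [e3] at hperm
    rw [candTail_eq_filterEnum uid p 0, List.drop_zero]
    simp only [Nat.cast_zero]
    exact (List.Perm.map (fun q => q.1) hperm).symm
  · exact candTail_pairwise uid p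

-- ----- the simulation -----

lemma getD_set_ne' {α : Type} (l : List α) (d : α) (k k' : Nat) (v : α) (h : k' ≠ k) :
    (l.set k v).getD k' d = l.getD k' d := by
  rw [List.getD_eq_getElem?_getD, List.getD_eq_getElem?_getD,
    List.getElem?_set_ne (by omega)]

lemma getD_set_self' {α : Type} (l : List α) (d : α) (k : Nat) (v : α) (h : k < l.length) :
    (l.set k v).getD k d = v := by
  rw [List.getD_eq_getElem _ _ (by simpa using h)]
  simp

lemma step_sim (uid people : List String) (hnd : people.Nodup) (k : Nat)
    (hk : k < people.length)
    (stA : PySem.Dict Int String × PySem.Dict String (List Int))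
    (qc : List String) (ptrs : List Nat) (asg : Bool)
    (h : SimRel uid people stA qc ptrs) :
    SimRel uid people (distributedStepA stA (people.getD k ""))
      (bStep uid people (qc, ptrs, asg) k).1 (bStep uid people (qc, ptrs, asg) k).2.1 ∧
    ((bStep uid people (qc, ptrs, asg) k).2.2 = false →
      distributedStepA stA (people.getD k "") = stA ∧
      (bStep uid people (qc, ptrs, asg) k).1 = qc) := by
  set p := people.getD k "" with hp
  set t := ptrs.getD k 0 with ht
  set i := pvSkip uid qc p t with hi
  unfold SimRel at h
  obtain ⟨hqlen, hplen, hqcd, hkeys, hinv⟩ := h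
  obtain ⟨pre, hL, hpre⟩ := hinv k hk
  obtain ⟨hti, hsk, hstop⟩ := pvSkip_spec uid qc p t
  obtain ⟨C, hCsplit, hCgood⟩ := candTail_split uid qc p hqlen i t hti hsk
  have hgood2 : goodPre qc (pre ++ C) := by
    intro y hy
    rcases List.mem_append.mp hy with hy | hy
    · exact hpre y hy
    · exact hCgood y hy
  have hfalse : ∀ y ∈ pre ++ C, ((stA.1.getD y "" == "") = false) := by
    intro y hy
    obtain ⟨j, rfl, hjn, hne⟩ := hgood2 y hy
    rw [hqcd, getD_mkEnum qc j hjn]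
    simpa using hne
  have hfind0 : (stA.2.getD p []).find? (fun y => stA.1.getD y "" == "")
      = (candTail uid p i).find? (fun y => stA.1.getD y "" == "") := by
    rw [hL, hCsplit, ← List.append_assoc, List.find?_append,
      List.find?_eq_none.mpr (fun y hy => by simp [hfalse y hy])]
    rfl
  by_cases hin : i < uid.length
  · -- found: A assigns index i to p and removes it; B sets qc[i] and advances the pointer
    have hqc_i : qc.getD i "" = "" := (hstop hin).1
    have huid_i : uid.getD i "" ≠ p := (hstop hin).2
    have hnotmem : ((i : Nat) : Int) ∉ pre ++ C := by
      intro hmem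
      obtain ⟨j, hji, hjn, hne⟩ := hgood2 _ hmem
      have hj : i = j := by exact_mod_cast hji
      subst hj
      exact hne hqc_i
    have hfind : (stA.2.getD p []).find? (fun y => stA.1.getD y "" == "")
        = some ((i : Nat) : Int) := by
      rw [hfind0, candTail_cons uid p i hin huid_i]
      have hpred : ((stA.1.getD ((i : Nat) : Int) "" == "") = true) := by
        rw [hqcd, getD_mkEnum qc i (by omega), hqc_i]
        rfl
      rw [List.find?_cons_of_pos (p := fun y => stA.1.getD y "" == "") hpred]
    have hstepA : distributedStepA stA p =
        (stA.1.insert ((i : Nat) : Int) p,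
         stA.2.modify p [] (fun l => (PySem.List.remove? l ((i : Nat) : Int)).getD l)) := by
      unfold distributedStepA
      rw [hfind]
    have hbstep : bStep uid people (qc, ptrs, asg) k = (qc.set i p, ptrs.set k (i + 1), true) := by
      unfold bStep
      dsimp only
      rw [← hp, ← ht, ← hi, if_pos hin]
    rw [hstepA, hbstep]
    constructor
    · unfold SimRel
      refine ⟨by simpa using hqlen, by simpa using hplen, ?_, ?_, ?_⟩
      · exact hqcd ▸ insert_mkEnum qc i (by omega) p
      · show (stA.2.modify p [] _).keys = people
        rw [PySem.Dict.keys_modify]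
        have hcont : stA.2.contains p = true := by
          rw [PySem.Dict.contains_iff_mem_keys, hkeys, hp, List.getD_eq_getElem people "" hk]
          exact List.getElem_mem hk
        rw [PySem.Dict.keys_insert_of_contains _ _ hcont]
        exact hkeys
      · intro k' hk'
        by_cases hkk : k' = k
        · subst hkk
          refine ⟨pre ++ C, ?_, ?_⟩
          · rw [← hp, getD_set_self' ptrs 0 k' (i + 1) (by omega),
              PySem.Dict.getD_modify_self,
              hL, hCsplit, candTail_cons uid p i hin huid_i, ← List.append_assoc,
              remove?_append_of_not_mem _ _ _ hnotmem, PySem.List.remove?_cons_self]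
            simp
          · intro y hy
            obtain ⟨j, rfl, hjn, hne⟩ := hgood2 y hy
            refine ⟨j, rfl, by simpa using hjn, ?_⟩
            have hji : j ≠ i := by intro e; subst e; exact hne hqc_i
            rw [getD_set_ne' qc "" i j p hji]
            exact hne
        · have hpk' : people.getD k' "" ≠ p := by
            rw [hp, List.getD_eq_getElem people "" hk', List.getD_eq_getElem people "" hk]
            intro e
            exact hkk ((List.Nodup.getElem_inj_iff hnd).mp e)
          obtain ⟨pre', hL', hpre'⟩ := hinv k' hk'
          refine ⟨pre', ?_, ?_⟩
          · rw [PySem.Dict.getD_modify, if_neg hpk', getD_set_ne' ptrs 0 k k' (i + 1) hkk]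
            exact hL'
          · intro y hy
            obtain ⟨j, rfl, hjn, hne⟩ := hpre' y hy
            refine ⟨j, rfl, by simpa using hjn, ?_⟩
            have hji : j ≠ i := by intro e; subst e; exact hne hqc_i
            rw [getD_set_ne' qc "" i j p hji]
            exact hne
    · intro hfalse2
      exact absurd hfalse2 (by simp)
  · -- not found: A leaves everything unchanged; B only moves the pointer to n
    have hfind : (stA.2.getD p []).find? (fun y => stA.1.getD y "" == "") = none := by
      rw [hfind0, candTail_stop uid p i hin]
      rfl
    have hstepA : distributedStepA stA p = stA := by
      unfold distributedStepA
      rw [hfind]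
    have hbstep : bStep uid people (qc, ptrs, asg) k = (qc, ptrs.set k i, asg) := by
      unfold bStep
      dsimp only
      rw [← hp, ← ht, ← hi, if_neg hin]
    rw [hstepA, hbstep]
    refine ⟨?_, fun _ => ⟨rfl, rfl⟩⟩
    unfold SimRel
    refine ⟨hqlen, by simpa using hplen, hqcd, hkeys, ?_⟩
    intro k' hk'
    by_cases hkk : k' = k
    · subst hkk
      refine ⟨pre ++ C, ?_, hgood2⟩
      rw [← hp, getD_set_self' ptrs 0 k' i (by omega), hL, hCsplit,
        candTail_stop uid p i hin]
      simp
    · obtain ⟨pre', hL', hpre'⟩ := hinv k' hk'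
      refine ⟨pre', ?_, hpre'⟩
      rw [getD_set_ne' ptrs 0 k k' i hkk]
      exact hL'

lemma bfold_true (uid people : List String) : ∀ (c k : Nat) (qc : List String) (ptrs : List Nat),
    (((List.range' k c).foldl (bStep uid people) (qc, ptrs, true)).2.2) = true := by
  intro c
  induction c with
  | zero => intro k qc ptrs; rfl
  | succ c ih =>
    intro k qc ptrs
    rw [List.range'_succ, List.foldl_cons]
    show (((List.range' (k + 1) c).foldl (bStep uid people)
      (bStep uid people (qc, ptrs, true) k)).2.2) = true
    unfold bStep
    dsimp only
    split
    · exact ih (k + 1) _ _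
    · exact ih (k + 1) _ _

lemma round_sim (uid people : List String) (hnd : people.Nodup) :
    ∀ (c k : Nat), k + c = people.length →
    ∀ stA qc ptrs (asg : Bool), SimRel uid people stA qc ptrs →
    SimRel uid people ((people.drop k).foldl distributedStepA stA)
        ((List.range' k c).foldl (bStep uid people) (qc, ptrs, asg)).1
        ((List.range' k c).foldl (bStep uid people) (qc, ptrs, asg)).2.1 ∧
    (((List.range' k c).foldl (bStep uid people) (qc, ptrs, asg)).2.2 = false →
      (people.drop k).foldl distributedStepA stA = stA ∧
      ((List.range' k c).foldl (bStep uid people) (qc, ptrs, asg)).1 = qc) := by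
  intro c
  induction c with
  | zero =>
    intro k hk stA qc ptrs asg hrel
    have hdrop : people.drop k = [] := List.drop_of_length_le (by omega)
    rw [hdrop]
    exact ⟨hrel, fun _ => ⟨rfl, rfl⟩⟩
  | succ c ih =>
    intro k hk stA qc ptrs asg hrel
    have hklt : k < people.length := by omega
    obtain ⟨hrel', hnoop⟩ := step_sim uid people hnd k hklt stA qc ptrs asg hrel
    have hdrop : people.drop k = people.getD k "" :: people.drop (k + 1) := by
      rw [List.getD_eq_getElem people "" hklt]
      exact List.drop_eq_getElem_cons hklt
    rw [hdrop, List.range'_succ, List.foldl_cons, List.foldl_cons]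
    obtain ⟨ih1, ih2⟩ := ih (k + 1) (by omega) (distributedStepA stA (people.getD k ""))
      (bStep uid people (qc, ptrs, asg) k).1
      (bStep uid people (qc, ptrs, asg) k).2.1
      (bStep uid people (qc, ptrs, asg) k).2.2 hrel'
    refine ⟨ih1, ?_⟩
    intro hfin
    have hflag : (bStep uid people (qc, ptrs, asg) k).2.2 = false := by
      cases hb : (bStep uid people (qc, ptrs, asg) k).2.2
      · rfl
      · exfalso
        have heq : bStep uid people (qc, ptrs, asg) k
            = ((bStep uid people (qc, ptrs, asg) k).1,
               (bStep uid people (qc, ptrs, asg) k).2.1, true) := by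
          rw [← hb]
        have htrue := bfold_true uid people c (k + 1)
          (bStep uid people (qc, ptrs, asg) k).1 (bStep uid people (qc, ptrs, asg) k).2.1
        rw [← heq] at htrue
        rw [htrue] at hfin
        exact Bool.noConfusion hfin
    obtain ⟨hA1, hQ1⟩ := hnoop hflag
    obtain ⟨hA2, hQ2⟩ := ih2 hfin
    constructor
    · rw [hA1] at hA2 ⊢
      exact hA2
    · rw [hQ2, hQ1]

lemma loop_sim (uid people : List String) (hnd : people.Nodup) :
    ∀ (c : Nat) stA qc ptrs, SimRel uid people stA qc ptrs →
    (roundA^[c] stA).1 = PySem.Dict.mk (PySem.List.enumerate (pvLoop uid people c qc ptrs)) := by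
  intro c
  induction c with
  | zero =>
    intro stA qc ptrs hrel
    unfold SimRel at hrel
    exact hrel.2.2.1
  | succ c ih =>
    intro stA qc ptrs hrel
    obtain ⟨hrel', hnoop⟩ :=
      round_sim uid people hnd people.length 0 (by omega) stA qc ptrs false hrel
    rw [List.drop_zero] at hrel' hnoop
    have hra : roundA stA = people.foldl distributedStepA stA := by
      unfold roundA
      unfold SimRel at hrel
      rw [hrel.2.2.2.1]
    have hpr : pvRound uid people (qc, ptrs, false)
        = (List.range' 0 people.length).foldl (bStep uid people) (qc, ptrs, false) := by
      rw [pvRound_eq, List.range_eq_range']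
    rw [Function.iterate_succ_apply, pvLoop]
    by_cases hb : (pvRound uid people (qc, ptrs, false)).2.2 = true
    · rw [if_pos hb]
      have hrel'' : SimRel uid people (roundA stA) (pvRound uid people (qc, ptrs, false)).1
          (pvRound uid people (qc, ptrs, false)).2.1 := by
        rw [hra, hpr]
        exact hrel'
      exact ih (roundA stA) _ _ hrel''
    · rw [if_neg hb]
      have hb' : ((List.range' 0 people.length).foldl (bStep uid people) (qc, ptrs, false)).2.2
          = false := by
        rw [← hpr]
        exact Bool.not_eq_true _ ▸ (by simpa using hb)
      obtain ⟨hA, hQ⟩ := hnoop hb'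
      have hfix : roundA stA = stA := by rw [hra, hA]
      have hiter : roundA^[c] (roundA stA) = stA := by
        rw [hfix]
        exact Function.iterate_fixed hfix c
      rw [hiter]
      unfold SimRel at hrel
      rw [hrel.2.2.1, hpr, hQ]

lemma foldl_range_const {σ : Type} (f : σ → σ) : ∀ (c : Nat) (st : σ),
    (List.range c).foldl (fun st _ => f st) st = f^[c] st := by
  intro c
  induction c with
  | zero => intro st; rfl
  | succ c ih =>
    intro st
    rw [List.range_succ, List.foldl_append, ih, List.foldl_cons, List.foldl_nil,
      Function.iterate_succ_apply']

lemma enum_eq_rangeMap (l : List String) :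
    PySem.List.enumerate l =
      (List.range l.length).map (fun (j : Nat) => ((j : Int), l.getD j "")) := by
  apply List.ext_getElem
  · simp [PySem.List.length_enumerate]
  · intro k h1 h2
    have hk : k < l.length := by simpa [PySem.List.length_enumerate] using h1
    simp only [PySem.List.getElem_enumerate, List.getElem_map, List.getElem_range]
    rw [List.getD_eq_getElem l "" hk]
    simp

lemma bfold_len (uid people : List String) :
    ∀ (L : List Nat) (st : List String × List Nat × Bool),
    ((L.foldl (bStep uid people) st).1.length) = st.1.length := by
  intro L
  induction L with
  | nil => intro st; rfl
  | cons k L ih =>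
    intro st
    rw [List.foldl_cons, ih]
    unfold bStep
    dsimp only
    split <;> simp

lemma pvLoop_length (uid people : List String) : ∀ (c : Nat) (qc : List String) (ptrs : List Nat),
    (pvLoop uid people c qc ptrs).length = qc.length := by
  intro c
  induction c with
  | zero => intro qc ptrs; rfl
  | succ c ih =>
    intro qc ptrs
    have hlen : (pvRound uid people (qc, ptrs, false)).1.length = qc.length := by
      rw [pvRound_eq]; exact bfold_len uid people _ _
    rw [pvLoop]
    split
    · rw [ih, hlen]
    · exact hlen

lemma init_qc (uid : List String) :
    ((PySem.List.enumerate uid).foldl (fun qc ie => qc.insert ie.1 "") PySem.Dict.empty :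
      PySem.Dict Int String) =
      PySem.Dict.mk (PySem.List.enumerate (List.replicate uid.length "")) := by
  have hfresh : ∀ a ∈ PySem.List.enumerate uid,
      (PySem.Dict.empty : PySem.Dict Int String).contains a.1 = false := by
    intro a _
    simp
  have hnd := nodup_keys_mkEnum uid
  have hnd' : ((PySem.List.enumerate uid).map (fun q => q.1)).Nodup := hnd
  apply PySem.Dict.ext
  have hit := PySem.Dict.items_foldl_insert_fresh (PySem.List.enumerate uid)
    (fun q => q.1) (fun _ => "") PySem.Dict.empty hfresh hnd'
  simp only at hit
  rw [hit]
  show [] ++ _ = _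
  rw [List.nil_append]
  apply List.ext_getElem
  · simp [PySem.List.length_enumerate]
  · intro k h1 h2
    have hk : k < uid.length := by
      simpa [PySem.List.length_enumerate] using h2
    simp [PySem.List.getElem_enumerate, List.getElem_replicate]

lemma init_rel (uid qcPeople : List String) :
    SimRel uid (PySem.Set.ofList qcPeople)
      ((PySem.List.enumerate uid).foldl (fun qc ie => qc.insert ie.1 "") PySem.Dict.empty,
       qcPeople.foldl (fun m each => m.insert each (ret each (dbA uid))) PySem.Dict.empty)
      (List.replicate uid.length "")
      (List.replicate (PySem.Set.ofList qcPeople : List String).length 0) := by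
  unfold SimRel
  refine ⟨by simp, by simp, init_qc uid, ?_, ?_⟩
  · have h1 := PySem.Dict.keys_foldl_insert (l := qcPeople)
      (f := fun _ each => ret each (dbA uid)) (d := (PySem.Dict.empty : PySem.Dict String (List Int)))
    simp only at h1
    rw [h1]
    simp [PySem.Set.update, PySem.Set.ofList_eq_foldl]
  · intro k hk
    refine ⟨[], ?_, by intro y hy; simp at hy⟩
    have hmem : (PySem.Set.ofList qcPeople : List String).getD k "" ∈ qcPeople := by
      rw [List.getD_eq_getElem _ "" hk]
      exact (PySem.Set.mem_ofList qcPeople _).mp (List.getElem_mem hk)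
    have hgd := getD_foldl_insert_const qcPeople (fun each => ret each (dbA uid))
      PySem.Dict.empty ((PySem.Set.ofList qcPeople : List String).getD k "")
    simp only at hgd
    rw [hgd, if_pos hmem, ret_eq]
    rw [List.getD_eq_getElem _ 0 (by simpa using hk), List.getElem_replicate]
    simp

-- ===== VERDICT (by name: the statement is the Claim_ definition above) =====
theorem distributed_spec : Claim_equal_distributed := by
  unfold Claim_equal_distributed
  intro uid qcPeople _
  show distributed uid qcPeople = distributed_alt uid qcPeople
  have hpeople : (qcPeople.foldl
      (fun st p => if PySem.Set.contains st.1 p then st else (PySem.Set.add st.1 p, st.2 ++ [p]))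
      ((PySem.Set.empty : PySem.Set String), ([] : List String))).2
      = (PySem.Set.ofList qcPeople : List String) := by
    rw [PySem.Set.ofList_eq_foldl]
    exact people_eq_update qcPeople ([] : PySem.Set String)
  have hA : distributed uid qcPeople = (roundA^[uid.length]
      ((PySem.List.enumerate uid).foldl (fun qc ie => qc.insert ie.1 "") PySem.Dict.empty,
       qcPeople.foldl (fun m each => m.insert each (ret each (dbA uid))) PySem.Dict.empty)).1.items := by
    have hA0 : distributed uid qcPeople = ((List.range uid.length).foldl
        (fun st _ => roundA st)
        ((PySem.List.enumerate uid).foldl (fun qc ie => qc.insert ie.1 "") PySem.Dict.empty,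
         qcPeople.foldl (fun m each => m.insert each (ret each (dbA uid)))
           PySem.Dict.empty)).1.items := rfl
    rw [hA0, foldl_range_const roundA uid.length]
  have hB : distributed_alt uid qcPeople = (List.range uid.length).map
      (fun (i : Nat) => ((i : Int),
        (pvLoop uid (PySem.Set.ofList qcPeople) uid.length (List.replicate uid.length "")
          (List.replicate (PySem.Set.ofList qcPeople : List String).length 0)).getD i "")) := by
    have hB0 : distributed_alt uid qcPeople = (List.range uid.length).map
        (fun (i : Nat) => ((i : Int),
          (pvLoop uid
            ((qcPeople.foldl (fun st p => if PySem.Set.contains st.1 p then st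
                else (PySem.Set.add st.1 p, st.2 ++ [p]))
              ((PySem.Set.empty : PySem.Set String), ([] : List String))).2)
            uid.length (List.replicate uid.length "")
            (List.replicate ((qcPeople.foldl (fun st p => if PySem.Set.contains st.1 p then st
                else (PySem.Set.add st.1 p, st.2 ++ [p]))
              ((PySem.Set.empty : PySem.Set String), ([] : List String))).2).length 0)).getD i "")) := rfl
    rw [hB0, hpeople]
  rw [hA, hB]
  have hmain := loop_sim uid (PySem.Set.ofList qcPeople) (PySem.Set.nodup_ofList qcPeople)
    uid.length _ _ _ (init_rel uid qcPeople)
  rw [hmain]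
  show PySem.List.enumerate _ = _
  rw [enum_eq_rangeMap, pvLoop_length, List.length_replicate]
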